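-- pv_equiv track=rewrite | github.com/ishaanrathodd/atlas-memory | src/memory/enrichment.py | _token_overlap_count
-- ===== SOURCE A (Python) =====
-- def _token_overlap_count(query_tokens: set[str], candidate_tokens: set[str]) -> int:
--     overlap: set[str] = set()
--     for query_token in query_tokens:
--         for candidate_token in candidate_tokens:
--             if query_token == candidate_token:
--                 overlap.add(query_token)
--                 break
--             if len(query_token) >= 6 and len(candidate_token) >= 6:
--                 if query_token.startswith(candidate_token) or candidate_token.startswith(query_token):
--                     overlap.add(query_token)
--                     break
--     return len(overlap)
-- ===== SOURCE B (Python) =====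
-- def _token_overlap_count(query_tokens: set[str], candidate_tokens: set[str]) -> int:
--     cand = set(candidate_tokens)
--     # index every prefix (length >= 6) of every long candidate once
--     cand_prefixes: set[str] = set()
--     for c in cand:
--         if len(c) >= 6:
--             for k in range(6, len(c) + 1):
--                 cand_prefixes.add(c[:k])
--     count = 0
--     for q in set(query_tokens):
--         if q in cand:
--             count += 1
--         elif len(q) >= 6 and (q in cand_prefixes
--                               or any(q[:k] in cand for k in range(6, len(q)))):
--             count += 1
--     return count
-- ===== Notes on version B (the rewrite author's own statement) =====
-- stated objective: faster
-- what changed: Replaces the nested scan over all query/candidate pairs by hash-set lookups: a prefix set of all length>=6 prefixes of candidates answers 'q is a prefix of some candidate', and enumerating q's own prefixes against the candidate set answers the other direction, so each query token costs O(L) lookups instead of a scan over all candidates.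
import Mathlib
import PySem

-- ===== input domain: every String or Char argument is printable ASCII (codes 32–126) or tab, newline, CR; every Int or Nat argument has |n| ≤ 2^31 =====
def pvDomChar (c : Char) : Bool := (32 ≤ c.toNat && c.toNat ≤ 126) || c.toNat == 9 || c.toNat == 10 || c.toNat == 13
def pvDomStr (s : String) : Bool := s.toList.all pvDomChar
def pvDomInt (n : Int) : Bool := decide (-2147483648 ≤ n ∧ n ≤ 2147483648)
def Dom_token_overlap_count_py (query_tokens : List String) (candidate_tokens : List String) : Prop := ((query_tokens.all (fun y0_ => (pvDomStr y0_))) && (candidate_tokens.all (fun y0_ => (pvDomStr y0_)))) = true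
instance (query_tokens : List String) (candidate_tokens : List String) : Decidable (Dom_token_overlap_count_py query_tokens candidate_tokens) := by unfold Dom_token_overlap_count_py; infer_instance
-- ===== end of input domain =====

-- B replaces A's scan over all query×candidate pairs by hash-set lookups (a set of all
-- length-≥6 candidate prefixes, plus lookups of the query's own prefixes); return value only.

-- ===== PORT A =====
-- the inner 'for candidate_token in candidate_tokens' loop with its two add-and-break exits
def pvInnerA (q : String) (ov : PySem.Set String) : List String → PySem.Set String
  | [] => ov
  | c :: rest =>
    if q == c then PySem.Set.add ov q
    else if 6 ≤ PySem.Str.len q && 6 ≤ PySem.Str.len c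
            && (PySem.Str.startswith q c || PySem.Str.startswith c q) then PySem.Set.add ov q
    else pvInnerA q ov rest

def token_overlap_count_py (query_tokens : List String) (candidate_tokens : List String) : Int :=
  let overlap : PySem.Set String :=
    query_tokens.foldl (fun ov q => pvInnerA q ov candidate_tokens) PySem.Set.empty
  PySem.Set.len overlap

-- ===== PORT B =====
-- 'for k in range(6, len(c)+1): cand_prefixes.add(c[:k])' guarded by 'len(c) >= 6'
def pvAddPrefixes (ps : PySem.Set String) (c : String) : PySem.Set String :=
  if 6 ≤ PySem.Str.len c then
    (PySem.List.pyRange 6 (PySem.Str.len c + 1)).foldl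
      (fun ps k => PySem.Set.add ps (PySem.Str.slice c none (some k))) ps
  else ps

def token_overlap_count_py_alt (query_tokens : List String) (candidate_tokens : List String) : Int :=
  let cand : PySem.Set String := PySem.Set.ofList candidate_tokens
  let candPrefixes : PySem.Set String := cand.foldl pvAddPrefixes PySem.Set.empty
  (PySem.Set.ofList query_tokens).foldl
    (fun count q =>
      if PySem.Set.contains cand q then count + 1
      else if 6 ≤ PySem.Str.len q
              && (PySem.Set.contains candPrefixes q
                  || (PySem.List.pyRange 6 (PySem.Str.len q)).any
                       (fun k => PySem.Set.contains cand (PySem.Str.slice q none (some k)))) then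
        count + 1
      else count) 0

-- ===== PRECONDITION & SPEC =====
def Spec_token_overlap_count_py (query_tokens : List String) (candidate_tokens : List String) (out : Int) : Prop := out = token_overlap_count_py_alt query_tokens candidate_tokens
instance (query_tokens : List String) (candidate_tokens : List String) (out : Int) : Decidable (Spec_token_overlap_count_py query_tokens candidate_tokens out) := by unfold Spec_token_overlap_count_py; infer_instance

-- ===== CLAIM (what is proved, stated in full; the proofs are below) =====
def Claim_equal_token_overlap_count_py : Prop := ∀ (query_tokens : List String) (candidate_tokens : List String), Dom_token_overlap_count_py query_tokens candidate_tokens → Spec_token_overlap_count_py query_tokens candidate_tokens (token_overlap_count_py query_tokens candidate_tokens)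

-- ===== LEMMAS AND PROOFS =====

-- A's per-query match test, as a single boolean
def pvMatchA (q : String) (C : List String) : Bool :=
  C.any (fun c => q == c || (6 ≤ PySem.Str.len q && 6 ≤ PySem.Str.len c
            && (PySem.Str.startswith q c || PySem.Str.startswith c q)))

theorem pvInnerA_eq (q : String) (ov : PySem.Set String) (C : List String) :
    pvInnerA q ov C = if pvMatchA q C then PySem.Set.add ov q else ov := by
  induction C with
  | nil => simp [pvInnerA, pvMatchA]
  | cons c rest ih =>
    unfold pvInnerA
    rw [ih]
    unfold pvMatchA
    rw [List.any_cons]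
    cases hb1 : (q == c) <;>
      cases hb2 : (6 ≤ PySem.Str.len q && 6 ≤ PySem.Str.len c
            && (PySem.Str.startswith q c || PySem.Str.startswith c q)) <;>
      cases hb3 : rest.any (fun c => q == c || (6 ≤ PySem.Str.len q && 6 ≤ PySem.Str.len c
            && (PySem.Str.startswith q c || PySem.Str.startswith c q))) <;>
      simp [hb1, hb2, hb3]

theorem pv_discard_filter (s : List String) (p : String → Bool) (x : String) :
    PySem.Set.discard (s.filter p) x = (PySem.Set.discard s x).filter p := by
  unfold PySem.Set.discard
  rw [List.filter_filter, List.filter_filter]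
  apply List.filter_congr
  intro y _
  exact Bool.and_comm _ _

theorem pv_discard_of_not_mem {s : List String} {x : String} (h : x ∉ s) :
    PySem.Set.discard s x = s := by
  unfold PySem.Set.discard
  apply List.filter_eq_self.mpr
  intro a ha
  have hax : a ≠ x := by rintro rfl; exact h ha
  simp [hax]

theorem pv_ofList_filter (p : String → Bool) (l : List String) :
    PySem.Set.ofList (l.filter p) = (PySem.Set.ofList l).filter p := by
  induction l with
  | nil => simp [PySem.Set.ofList_nil]
  | cons x xs ih =>
    by_cases hx : p x = true
    · rw [List.filter_cons_of_pos hx, PySem.Set.ofList_cons, PySem.Set.ofList_cons,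
        List.filter_cons_of_pos hx, ih, pv_discard_filter]
    · rw [List.filter_cons_of_neg (by simp [hx]), PySem.Set.ofList_cons,
        List.filter_cons_of_neg (by simp [hx]), ih, ← pv_discard_filter,
        pv_discard_of_not_mem]
      intro hmem
      exact absurd (List.of_mem_filter hmem) (by simp [hx])

theorem pvA_eq_count (Q C : List String) :
    token_overlap_count_py Q C = ((PySem.Set.ofList Q).countP (fun q => pvMatchA q C) : Int) := by
  unfold token_overlap_count_py
  have h1 : Q.foldl (fun ov q => pvInnerA q ov C) PySem.Set.empty
      = Q.foldl (fun ov q => if pvMatchA q C = true then PySem.Set.add ov q else ov)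
          PySem.Set.empty := by
    apply PySem.List.foldl_congr_mem
    intro acc x _
    exact pvInnerA_eq x acc C
  rw [h1, PySem.List.foldl_if_eq_foldl_filter]
  show PySem.Set.len (List.foldl PySem.Set.add [] (List.filter _ Q)) = _
  rw [← PySem.Set.ofList_eq_foldl, pv_ofList_filter]
  unfold PySem.Set.len
  rw [List.countP_eq_length_filter]

-- membership in a fold of adds over a mapped index list
theorem pv_mem_foldl_add {β : Type} (f : β → String) (l : List β) (s : PySem.Set String) (x : String) :
    x ∈ l.foldl (fun s b => PySem.Set.add s (f b)) s ↔ x ∈ s ∨ ∃ b ∈ l, x = f b := by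
  induction l generalizing s with
  | nil => simp
  | cons y ys ih =>
    rw [List.foldl_cons, ih]
    simp only [PySem.Set.mem_add, List.mem_cons]
    constructor
    · rintro ((h | h) | ⟨b, hb, h⟩)
      · exact Or.inl h
      · exact Or.inr ⟨y, Or.inl rfl, h⟩
      · exact Or.inr ⟨b, Or.inr hb, h⟩
    · rintro (h | ⟨b, (rfl | hb), h⟩)
      · exact Or.inl (Or.inl h)
      · exact Or.inl (Or.inr h)
      · exact Or.inr ⟨b, hb, h⟩

theorem pv_mem_addPrefixes_fold (l : List String) (s : PySem.Set String) (x : String) :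
    x ∈ l.foldl pvAddPrefixes s ↔
      x ∈ s ∨ ∃ c ∈ l, 6 ≤ PySem.Str.len c ∧
        ∃ k : Int, 6 ≤ k ∧ k < PySem.Str.len c + 1 ∧ x = PySem.Str.slice c none (some k) := by
  induction l generalizing s with
  | nil => simp
  | cons c cs ih =>
    rw [List.foldl_cons, ih]
    have hstep : x ∈ pvAddPrefixes s c ↔ x ∈ s ∨ (6 ≤ PySem.Str.len c ∧
        ∃ k : Int, 6 ≤ k ∧ k < PySem.Str.len c + 1 ∧ x = PySem.Str.slice c none (some k)) := by
      unfold pvAddPrefixes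
      by_cases hc : 6 ≤ PySem.Str.len c
      · rw [if_pos hc, pv_mem_foldl_add]
        simp only [PySem.List.mem_pyRange_one, hc, true_and]
        constructor
        · rintro (h | ⟨k, ⟨hk1, hk2⟩, h⟩)
          · exact Or.inl h
          · exact Or.inr ⟨k, hk1, hk2, h⟩
        · rintro (h | ⟨k, hk1, hk2, h⟩)
          · exact Or.inl h
          · exact Or.inr ⟨k, ⟨hk1, hk2⟩, h⟩
      · rw [if_neg hc]
        constructor
        · exact Or.inl
        · rintro (h | ⟨h6, _⟩)
          · exact h
          · exact absurd h6 hc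
    rw [hstep]
    simp only [List.mem_cons]
    constructor
    · rintro ((h | h) | ⟨d, hd, h6, hk⟩)
      · exact Or.inl h
      · exact Or.inr ⟨c, Or.inl rfl, h⟩
      · exact Or.inr ⟨d, Or.inr hd, h6, hk⟩
    · rintro (h | ⟨d, (rfl | hd), h6, hk⟩)
      · exact Or.inl (Or.inl h)
      · exact Or.inl (Or.inr ⟨h6, hk⟩)
      · exact Or.inr ⟨d, hd, h6, hk⟩

-- a slice c[:k] with 6 ≤ k ≤ len c is exactly a length-≥6 prefix of c
theorem pv_slice_prefix_iff (c x : String) (hc : 6 ≤ PySem.Str.len c) :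
    (∃ k : Int, 6 ≤ k ∧ k < PySem.Str.len c + 1 ∧ x = PySem.Str.slice c none (some k)) ↔
      (6 ≤ PySem.Str.len x ∧ x.toList <+: c.toList) := by
  rw [PySem.Str.len_eq] at hc
  constructor
  · rintro ⟨k, hk1, hk2, rfl⟩
    rw [PySem.Str.len_eq] at hk2
    have hk0 : 0 ≤ k := by omega
    have htl : (PySem.Str.slice c none (some k)).toList = c.toList.take k.toNat := by
      rw [PySem.Str.toList_slice, PySem.Chars.slice_eq_listSlice, PySem.List.slice_to _ hk0]
    constructor
    · rw [PySem.Str.len_eq, htl, List.length_take]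
      push_cast
      omega
    · rw [htl]
      exact List.take_prefix _ _
  · rintro ⟨hx6, hpre⟩
    rw [PySem.Str.len_eq] at hx6
    have hle := hpre.length_le
    refine ⟨(x.toList.length : Int), by exact_mod_cast hx6, by rw [PySem.Str.len_eq]; push_cast; omega, ?_⟩
    apply String.toList_inj.mp
    rw [PySem.Str.toList_slice, PySem.Chars.slice_eq_listSlice,
      PySem.List.slice_to _ (by positivity), Int.toNat_natCast]
    exact List.prefix_iff_eq_take.mp hpre

theorem pvMatchA_eq_matchB (q : String) (C : List String) :
    pvMatchA q C =
      (PySem.Set.contains (PySem.Set.ofList C) q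
        || (6 ≤ PySem.Str.len q
            && (PySem.Set.contains ((PySem.Set.ofList C).foldl pvAddPrefixes PySem.Set.empty) q
                || (PySem.List.pyRange 6 (PySem.Str.len q)).any
                     (fun k => PySem.Set.contains (PySem.Set.ofList C) (PySem.Str.slice q none (some k)))))) := by
  rw [Bool.eq_iff_iff]
  simp only [pvMatchA, List.any_eq_true, Bool.or_eq_true, Bool.and_eq_true, decide_eq_true_eq,
    beq_iff_eq, PySem.Str.startswith_eq, PySem.Chars.startswith_iff,
    PySem.Set.contains, List.contains_iff_mem, PySem.Set.mem_ofList,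
    pv_mem_addPrefixes_fold, PySem.Set.empty, List.not_mem_nil, false_or,
    PySem.List.mem_pyRange_one]
  constructor
  · rintro ⟨c, hcC, rfl | ⟨⟨h6q, h6c⟩, hpre | hpre⟩⟩
    · exact Or.inl hcC
    · by_cases heq : c.toList.length = q.toList.length
      · have hcq : c.toList = q.toList := List.IsPrefix.eq_of_length hpre heq
        exact Or.inl (String.toList_inj.mp hcq ▸ hcC)
      · have hlt : c.toList.length < q.toList.length := lt_of_le_of_ne hpre.length_le heq
        refine Or.inr ⟨h6q, Or.inr ⟨(c.toList.length : Int), ⟨?_, ?_⟩, ?_⟩⟩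
        · rw [PySem.Str.len_eq] at h6c; exact_mod_cast h6c
        · rw [PySem.Str.len_eq]; exact_mod_cast hlt
        · have hsl : PySem.Str.slice q none (some (c.toList.length : Int)) = c := by
            apply String.toList_inj.mp
            rw [PySem.Str.toList_slice, PySem.Chars.slice_eq_listSlice,
              PySem.List.slice_to _ (by positivity), Int.toNat_natCast]
            exact (List.prefix_iff_eq_take.mp hpre).symm
          rw [hsl]; exact hcC
    · refine Or.inr ⟨h6q, Or.inl ⟨c, hcC, h6c, ?_⟩⟩
      rw [pv_slice_prefix_iff c q h6c]
      exact ⟨h6q, hpre⟩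
  · rintro (hq | ⟨h6q, ⟨c, hcC, h6c, hk⟩ | ⟨k, ⟨hk1, hk2⟩, hmem⟩⟩)
    · exact ⟨q, hq, Or.inl rfl⟩
    · have hp := (pv_slice_prefix_iff c q h6c).mp hk
      exact ⟨c, hcC, Or.inr ⟨⟨h6q, h6c⟩, Or.inr hp.2⟩⟩
    · rw [PySem.Str.len_eq] at hk2
      have hk0 : 0 ≤ k := by omega
      refine ⟨_, hmem, Or.inr ⟨⟨h6q, ?_⟩, Or.inl ?_⟩⟩
      · rw [PySem.Str.len_eq, PySem.Str.toList_slice, PySem.Chars.slice_eq_listSlice,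
          PySem.List.slice_to _ hk0, List.length_take]
        push_cast
        omega
      · rw [PySem.Str.toList_slice, PySem.Chars.slice_eq_listSlice, PySem.List.slice_to _ hk0]
        exact List.take_prefix _ _

theorem pvB_eq_count (Q C : List String) :
    token_overlap_count_py_alt Q C
      = ((PySem.Set.ofList Q).countP (fun q => pvMatchA q C) : Int) := by
  unfold token_overlap_count_py_alt
  have hmerge : ∀ (b1 b2 : Bool) (n : Int),
      (if b1 then n + 1 else if b2 then n + 1 else n) = (if (b1 || b2) then n + 1 else n) := by
    intro b1 b2 n; cases b1 <;> cases b2 <;> simp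
  have h1 : (PySem.Set.ofList Q).foldl
      (fun count q =>
        if PySem.Set.contains (PySem.Set.ofList C) q then count + 1
        else if 6 ≤ PySem.Str.len q
              && (PySem.Set.contains ((PySem.Set.ofList C).foldl pvAddPrefixes PySem.Set.empty) q
                  || (PySem.List.pyRange 6 (PySem.Str.len q)).any
                       (fun k => PySem.Set.contains (PySem.Set.ofList C) (PySem.Str.slice q none (some k)))) then
          count + 1
        else count) (0 : Int)
      = (PySem.Set.ofList Q).foldl (fun count q => if pvMatchA q C = true then count + 1 else count) (0 : Int) := by
    apply PySem.List.foldl_congr_mem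
    intro acc x _
    rw [hmerge, ← pvMatchA_eq_matchB]
  rw [h1, PySem.List.foldl_if_add_one]
  simp

-- ===== VERDICT (by name: the statement is the Claim_ definition above) =====
theorem token_overlap_count_py_spec : Claim_equal_token_overlap_count_py := by
  intro Q C _
  unfold Spec_token_overlap_count_py
  rw [pvA_eq_count, pvB_eq_count]
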